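-- pv_equiv track=rewrite | github.com/cg342/web_sample | allfunctions.py | getNWake
-- ===== SOURCE A (Python) =====
-- def getNWake(L, duration):
--     wake = 0
--     onset = 0 # onset of wake
--     cont = 0  # continuous count of wake
--     count = 0 # count of bouts
--     # i is index, j is value
--     for i,j in enumerate(L):
--       if j == 5:
--         onset = 1
--         cont += 1
--         if i!=len(L)-1 and L[i+1]!=5 or i==len(L)-1 and onset == 1:
--           onset = 0
--           if cont >= duration*2:
--             count += 1
--           cont = 0
--
--     return count
-- ===== SOURCE B (Python) =====
-- def getNWake(L, duration):
--     # Staged boundary-detection: collect the indices where a maximal run of 5s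
--     # starts and where one ends, pair them up positionally with zip, and count
--     # the pairs spanning at least duration*2 samples.
--     n = len(L)
--     starts = [i for i in range(n) if L[i] == 5 and (i == 0 or L[i - 1] != 5)]
--     ends = [i for i in range(n) if L[i] == 5 and (i == n - 1 or L[i + 1] != 5)]
--     return sum(1 for s, e in zip(starts, ends) if e - s + 1 >= duration * 2)
-- ===== Notes on version B (the rewrite author's own statement) =====
-- stated objective: alternative
-- what changed: Replaces A's single-pass onset/cont state machine with staged boundary detection: two index comprehensions collect the start and end indices of maximal 5-runs, zip pairs them positionally, and a run counts when end - start + 1 >= duration*2.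
import Mathlib
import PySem

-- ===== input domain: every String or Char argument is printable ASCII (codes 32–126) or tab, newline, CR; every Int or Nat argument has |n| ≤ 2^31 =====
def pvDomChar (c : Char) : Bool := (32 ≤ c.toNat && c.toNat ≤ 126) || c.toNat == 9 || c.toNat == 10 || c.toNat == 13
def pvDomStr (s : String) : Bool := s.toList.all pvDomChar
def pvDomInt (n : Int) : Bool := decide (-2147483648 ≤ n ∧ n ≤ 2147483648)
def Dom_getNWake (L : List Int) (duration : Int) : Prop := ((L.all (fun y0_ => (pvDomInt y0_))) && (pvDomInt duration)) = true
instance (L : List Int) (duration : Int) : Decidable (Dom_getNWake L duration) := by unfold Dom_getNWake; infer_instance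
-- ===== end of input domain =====

-- B replaces A's per-element onset/cont state machine by staged boundary detection:
-- two comprehensions collect the start/end indices of maximal 5-runs, zip pairs them,
-- and pairs spanning ≥ duration*2 are counted (objective: alternative; same O(n) cost).

-- ===== PORT A =====
-- loop body of A's 'for i,j in enumerate(L)' (variable 'wake' of A is never used and is omitted);
-- Python evaluates L[i+1] only when i != len(L)-1 (short-circuit 'and'), so the index is always in
-- range there and pyGetD's default 0 is never consulted.
def pvStepA (L : List Int) (duration : Int) (st : Int × Int × Int) (p : Int × Int) : Int × Int × Int :=
  let (onset, cont, count) := st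
  let i := p.1
  let j := p.2
  if j = 5 then
    let onset : Int := 1
    let cont := cont + 1
    if (i ≠ (L.length : Int) - 1 ∧ PySem.List.pyGetD L (i + 1) 0 ≠ 5) ∨
       (i = (L.length : Int) - 1 ∧ onset = 1) then
      let _onset : Int := 0
      (_onset, 0, if cont ≥ duration * 2 then count + 1 else count)
    else (onset, cont, count)
  else (onset, cont, count)

def getNWake (L : List Int) (duration : Int) : Int :=
  ((PySem.List.enumerate L 0).foldl (pvStepA L duration) (0, 0, 0)).2.2

-- ===== PORT B =====
-- Source B's comprehension conditions 'L[i] == 5 and (i == 0 or L[i-1] != 5)' and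
-- 'L[i] == 5 and (i == n-1 or L[i+1] != 5)'; Python's short-circuit 'or' reads L[i-1]
-- (resp. L[i+1]) only at indices that are in range, so pyGetD's default 0 is never consulted.
def pvIsStart (L : List Int) (i : Nat) : Bool :=
  decide (PySem.List.pyGetD L (i : Int) 0 = 5 ∧
    ((i : Int) = 0 ∨ PySem.List.pyGetD L ((i : Int) - 1) 0 ≠ 5))

def pvIsEnd (L : List Int) (i : Nat) : Bool :=
  decide (PySem.List.pyGetD L (i : Int) 0 = 5 ∧
    ((i : Int) = (L.length : Int) - 1 ∨ PySem.List.pyGetD L ((i : Int) + 1) 0 ≠ 5))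

-- 'sum(1 for s, e in zip(starts, ends) if e - s + 1 >= duration * 2)' as length of a filter
def getNWake_alt (L : List Int) (duration : Int) : Int :=
  let starts := (List.range L.length).filter (pvIsStart L)
  let ends := (List.range L.length).filter (pvIsEnd L)
  (((starts.zip ends).filter
      (fun p => decide ((p.2 : Int) - (p.1 : Int) + 1 ≥ duration * 2))).length : Int)

-- ===== PRECONDITION & SPEC =====
def Spec_getNWake (L : List Int) (duration : Int) (out : Int) : Prop := out = getNWake_alt L duration
instance (L : List Int) (duration : Int) (out : Int) : Decidable (Spec_getNWake L duration out) := by unfold Spec_getNWake; infer_instance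

-- ===== CLAIM (what is proved, stated in full; the proofs are below) =====
def Claim_equal_getNWake : Prop := ∀ (L : List Int) (duration : Int), Dom_getNWake L duration → Spec_getNWake L duration (getNWake L duration)

-- ===== LEMMAS AND PROOFS =====

-- Common characterisation: process the remaining suffix with a pending 5-run of
-- length `cont` and `count` bouts so far, flushing the run when the lookahead
-- (the next element of the suffix) is absent or ≠ 5.
def pvH (d : Int) : List Int → Int → Int → Int
  | [], _, count => count
  | x :: xs, cont, count =>
    if x = 5 then
      match xs with
      | [] => if cont + 1 ≥ d * 2 then count + 1 else count
      | y :: ys =>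
        if y ≠ 5 then pvH d (y :: ys) 0 (if cont + 1 ≥ d * 2 then count + 1 else count)
        else pvH d (y :: ys) (cont + 1) count
    else pvH d xs cont count

-- evaluation lemmas for A's loop body
theorem pvStepA_not5 (L : List Int) (d onset cont count i j : Int) (hj : j ≠ 5) :
    pvStepA L d (onset, cont, count) (i, j) = (onset, cont, count) := by
  simp [pvStepA, hj]

theorem pvStepA_flush (L : List Int) (d onset cont count i : Int)
    (h : (i ≠ (L.length : Int) - 1 ∧ PySem.List.pyGetD L (i + 1) 0 ≠ 5) ∨ i = (L.length : Int) - 1) :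
    pvStepA L d (onset, cont, count) (i, 5) =
      (0, 0, if cont + 1 ≥ d * 2 then count + 1 else count) := by
  rcases h with h | h
  · simp [pvStepA, h.1, h.2]
  · simp [pvStepA, h]

theorem pvStepA_cont (L : List Int) (d onset cont count i : Int)
    (h1 : i ≠ (L.length : Int) - 1) (h2 : PySem.List.pyGetD L (i + 1) 0 = 5) :
    pvStepA L d (onset, cont, count) (i, 5) = (1, cont + 1, count) := by
  simp [pvStepA, h1, h2]

-- A's indexed fold over any suffix equals pvH on that suffix.
theorem pvA_eq_pvH (d : Int) (suf : List Int) :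
    ∀ (pre : List Int) (onset cont count : Int),
    ((PySem.List.enumerate suf (pre.length : Int)).foldl (pvStepA (pre ++ suf) d)
      (onset, cont, count)).2.2 = pvH d suf cont count := by
  induction suf with
  | nil => intro pre onset cont count; simp [PySem.List.enumerate_nil, pvH]
  | cons x xs ih =>
    intro pre onset cont count
    rw [PySem.List.enumerate_cons, List.foldl_cons]
    cases xs with
    | nil =>
      by_cases hx : x = 5
      · subst hx
        have hlast : ((pre.length : Int)) = (((pre ++ [(5:Int)]).length : Nat) : Int) - 1 := by
          simp
        rw [pvStepA_flush _ _ _ _ _ _ (Or.inr hlast)]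
        simp [PySem.List.enumerate_nil, pvH]
      · rw [pvStepA_not5 _ _ _ _ _ _ _ hx]
        simp [PySem.List.enumerate_nil, pvH, hx]
    | cons y ys =>
      have hidx : PySem.List.pyGetD (pre ++ x :: y :: ys) ((pre.length : Int) + 1) 0 = y := by
        have hsplit : pre ++ x :: y :: ys = (pre ++ [x]) ++ y :: ys := by simp
        rw [hsplit]
        have h1 : ((pre.length : Int) + 1) = (((pre ++ [x]).length : Nat) : Int) := by simp
        rw [h1, PySem.List.pyGetD_natCast]
        simp [List.getD_eq_getElem?_getD]
      have hne : ((pre.length : Int)) ≠ (((pre ++ x :: y :: ys).length : Nat) : Int) - 1 := by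
        simp only [List.length_append, List.length_cons]
        push_cast
        omega
      have hpre : ((pre.length : Int) + 1) = (((pre ++ [x]).length : Nat) : Int) := by simp
      have hL : pre ++ x :: y :: ys = (pre ++ [x]) ++ y :: ys := by simp
      by_cases hx : x = 5
      · subst hx
        by_cases hy : y = 5
        · subst hy
          rw [pvStepA_cont _ _ _ _ _ _ hne hidx, hpre, hL, ih (pre ++ [5])]
          simp [pvH]
        · rw [pvStepA_flush _ _ _ _ _ _ (Or.inl ⟨hne, by rw [hidx]; exact hy⟩), hpre, hL,
              ih (pre ++ [5])]
          simp [pvH, hy]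
      · rw [pvStepA_not5 _ _ _ _ _ _ _ hx, hpre, hL, ih (pre ++ [x])]
        simp [pvH, hx]

theorem pvH_add (d : Int) (L : List Int) :
    ∀ cont count : Int, pvH d L cont count = count + pvH d L cont 0 := by
  induction L with
  | nil => intro cont count; simp [pvH]
  | cons x xs ih =>
    intro cont count
    cases xs with
    | nil =>
      by_cases hx : x = 5
      · simp [pvH, hx]
        split_ifs <;> omega
      · simp [pvH, hx]
    | cons y ys =>
      by_cases hx : x = 5
      · subst hx
        by_cases hy : y = 5
        · subst hy
          have h1 : ∀ c : Int, pvH d (5 :: 5 :: ys) cont c = pvH d (5 :: ys) (cont + 1) c := by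
            intro c; conv_lhs => rw [pvH]
            simp
          rw [h1, h1]
          exact ih (cont + 1) count
        · have h1 : ∀ c : Int, pvH d (5 :: y :: ys) cont c =
              pvH d (y :: ys) 0 (if cont + 1 ≥ d * 2 then c + 1 else c) := by
            intro c; conv_lhs => rw [pvH]
            simp [hy]
          rw [h1, h1, ih 0 (if cont + 1 ≥ d * 2 then count + 1 else count),
              ih 0 (if cont + 1 ≥ d * 2 then 0 + 1 else 0)]
          generalize pvH d (y :: ys) 0 0 = P
          split_ifs <;> omega
      · have h1 : ∀ c : Int, pvH d (x :: y :: ys) cont c = pvH d (y :: ys) cont c := by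
          intro c; conv_lhs => rw [pvH]
          simp [hx]
        rw [h1, h1]
        exact ih cont count

-- the maximal run at the head: pvRunSplit h ys = (length of the prefix of ys equal to h, rest)
def pvRunSplit (h : Int) : List Int → Nat × List Int
  | [] => (0, [])
  | y :: ys => if y = h then ((pvRunSplit h ys).1 + 1, (pvRunSplit h ys).2) else (0, y :: ys)

theorem pvRunSplit_len (h : Int) (ys : List Int) : (pvRunSplit h ys).2.length ≤ ys.length := by
  induction ys with
  | nil => simp [pvRunSplit]
  | cons y ys ih =>
    by_cases hy : y = h
    · simp only [pvRunSplit, if_pos hy, List.length_cons]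
      omega
    · simp [pvRunSplit, hy]

theorem pvRunSplit_decomp (x : Int) (xs : List Int) :
    x :: xs = List.replicate ((pvRunSplit x xs).1 + 1) x ++ (pvRunSplit x xs).2 := by
  induction xs with
  | nil => simp [pvRunSplit]
  | cons y ys ih =>
    by_cases hy : y = x
    · subst hy
      simp only [pvRunSplit]
      rw [List.replicate_succ, List.cons_append]
      exact congrArg (y :: ·) ih
    · simp [pvRunSplit, hy, List.replicate_succ]

theorem pvRunSplit_head (x : Int) (xs : List Int) (y : Int) (ys : List Int)
    (h : (pvRunSplit x xs).2 = y :: ys) : y ≠ x := by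
  induction xs with
  | nil => simp [pvRunSplit] at h
  | cons z zs ih =>
    by_cases hz : z = x
    · exact ih (by simpa [pvRunSplit, hz] using h)
    · simp only [pvRunSplit, if_neg hz] at h
      cases h
      exact hz

theorem pvH_run5 (d : Int) (xs : List Int) :
    ∀ cont count : Int,
    pvH d (5 :: xs) cont count =
      pvH d (pvRunSplit 5 xs).2 0
        (if cont + 1 + ((pvRunSplit 5 xs).1 : Int) ≥ d * 2 then count + 1 else count) := by
  induction xs with
  | nil => intro cont count; simp [pvH, pvRunSplit]
  | cons y ys ih =>
    intro cont count
    by_cases hy : y = 5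
    · subst hy
      have h1 : pvH d (5 :: 5 :: ys) cont count = pvH d (5 :: ys) (cont + 1) count := by
        conv_lhs => rw [pvH]
        simp
      have h2 : pvRunSplit 5 ((5:Int) :: ys) = ((pvRunSplit 5 ys).1 + 1, (pvRunSplit 5 ys).2) := by
        simp [pvRunSplit]
      have h3 : cont + 1 + 1 + ((pvRunSplit 5 ys).1 : Int)
          = cont + 1 + (((pvRunSplit 5 ys).1 + 1 : Nat) : Int) := by push_cast; ring
      rw [h1, ih, h2, ← h3]
    · have h1 : pvH d (5 :: y :: ys) cont count =
          pvH d (y :: ys) 0 (if cont + 1 ≥ d * 2 then count + 1 else count) := by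
        conv_lhs => rw [pvH]
        simp [hy]
      have h2 : pvRunSplit 5 (y :: ys) = (0, y :: ys) := by simp [pvRunSplit, hy]
      rw [h1, h2]
      simp

theorem pvH_runNon5 (d : Int) (h : Int) (hh : h ≠ 5) (xs : List Int) :
    ∀ cont count : Int,
    pvH d (h :: xs) cont count = pvH d (pvRunSplit h xs).2 cont count := by
  induction xs with
  | nil => intro cont count; simp [pvH, pvRunSplit, hh]
  | cons y ys ih =>
    intro cont count
    have h1 : pvH d (h :: y :: ys) cont count = pvH d (y :: ys) cont count := by
      conv_lhs => rw [pvH]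
      simp [hh]
    by_cases hy : y = h
    · subst hy
      have h2 : pvRunSplit y (y :: ys) = ((pvRunSplit y ys).1 + 1, (pvRunSplit y ys).2) := by
        simp [pvRunSplit]
      rw [h1, h2]
      exact ih cont count
    · have h2 : pvRunSplit h (y :: ys) = (0, y :: ys) := by simp [pvRunSplit, hy]
      rw [h1, h2]

-- B-side: decomposition of the start/end index lists over the head run.
-- Throughout, L = replicate (m+1) x ++ rest with rest's head ≠ x.
theorem pvGetD_run (x : Int) (m : Nat) (rest : List Int) (i : Nat) (hi : i < m + 1) :
    (List.replicate (m + 1) x ++ rest).getD i 0 = x := by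
  rw [List.getD_append _ _ _ _ (by simpa using hi)]
  simp [hi]

theorem pvGetD_shift (x : Int) (m : Nat) (rest : List Int) (i : Nat) :
    (List.replicate (m + 1) x ++ rest).getD (m + 1 + i) 0 = rest.getD i 0 := by
  rw [List.getD_append_right _ _ _ _ (by simp)]
  simp

theorem pvStarts_decomp (x : Int) (m : Nat) (rest : List Int)
    (hhead : ∀ y ys, rest = y :: ys → y ≠ x) :
    (List.range (List.replicate (m + 1) x ++ rest).length).filter
        (pvIsStart (List.replicate (m + 1) x ++ rest)) =
      (if x = 5 then [0] else []) ++
        ((List.range rest.length).filter (pvIsStart rest)).map (m + 1 + ·) := by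
  have hlen : (List.replicate (m + 1) x ++ rest).length = (m + 1) + rest.length := by simp
  rw [hlen, List.range_add, List.filter_append]
  congr 1
  · -- head-run part: only index 0 can be a start
    rw [List.range_succ_eq_map, List.filter_cons]
    have h0 : pvIsStart (List.replicate (m + 1) x ++ rest) 0 = decide (x = 5) := by
      simp only [pvIsStart, Nat.cast_zero, PySem.List.pyGetD_zero,
        pvGetD_run x m rest 0 (by omega)]
      simp
    have hrest : List.filter (pvIsStart (List.replicate (m + 1) x ++ rest))
        ((List.range m).map Nat.succ) = [] := by
      rw [List.filter_map, List.map_eq_nil_iff, List.filter_eq_nil_iff]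
      intro j hj
      simp only [List.mem_range] at hj
      simp only [Function.comp_apply, pvIsStart, decide_eq_true_eq]
      have hj1 : ((j.succ : Nat) : Int) - 1 = ((j : Nat) : Int) := by push_cast; omega
      rw [PySem.List.pyGetD_natCast, hj1, PySem.List.pyGetD_natCast,
          pvGetD_run x m rest j.succ (by omega), pvGetD_run x m rest j (by omega)]
      rintro ⟨h5, h | h⟩
      · omega
      · exact h h5
    rw [h0, hrest]
    by_cases hx : x = 5 <;> simp [hx]
  · -- shifted part: starts of L past the run are starts of rest, shifted by m+1
    rw [List.filter_map]
    congr 1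
    apply List.filter_congr
    intro i hi
    simp only [List.mem_range] at hi
    simp only [Function.comp_apply, pvIsStart]
    rw [PySem.List.pyGetD_natCast, PySem.List.pyGetD_natCast, pvGetD_shift]
    cases i with
    | zero =>
      obtain ⟨y, ys, hrest⟩ : ∃ y ys, rest = y :: ys := by
        cases rest with
        | nil => simp at hi
        | cons y ys => exact ⟨y, ys, rfl⟩
      have hy : y ≠ x := hhead y ys hrest
      have h1 : ((m + 1 + 0 : Nat) : Int) - 1 = ((m : Nat) : Int) := by push_cast; omega
      rw [h1, PySem.List.pyGetD_natCast, pvGetD_run x m rest m (by omega)]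
      rw [decide_eq_decide]
      subst hrest
      simp only [List.getD_cons_zero]
      constructor
      · rintro ⟨h5, _⟩; exact ⟨h5, Or.inl rfl⟩
      · rintro ⟨h5, _⟩
        exact ⟨h5, Or.inr fun hx5 => hy (h5.trans hx5.symm)⟩
    | succ j =>
      have h1 : ((m + 1 + (j + 1) : Nat) : Int) - 1 = ((m + 1 + j : Nat) : Int) := by
        push_cast; omega
      have h2 : (((j + 1 : Nat)) : Int) - 1 = ((j : Nat) : Int) := by push_cast; omega
      rw [h1, h2, PySem.List.pyGetD_natCast, PySem.List.pyGetD_natCast, pvGetD_shift]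
      rw [decide_eq_decide]
      constructor
      · rintro ⟨h5, h | h⟩
        · omega
        · exact ⟨h5, Or.inr h⟩
      · rintro ⟨h5, h | h⟩
        · omega
        · exact ⟨h5, Or.inr h⟩

theorem pvEnds_decomp (x : Int) (m : Nat) (rest : List Int)
    (hhead : ∀ y ys, rest = y :: ys → y ≠ x) :
    (List.range (List.replicate (m + 1) x ++ rest).length).filter
        (pvIsEnd (List.replicate (m + 1) x ++ rest)) =
      (if x = 5 then [m] else []) ++
        ((List.range rest.length).filter (pvIsEnd rest)).map (m + 1 + ·) := by
  have hlen : (List.replicate (m + 1) x ++ rest).length = (m + 1) + rest.length := by simp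
  rw [hlen, List.range_add, List.filter_append]
  congr 1
  · -- head-run part: only index m can be an end
    rw [List.range_succ, List.filter_append, List.filter_cons]
    have hrest0 : List.filter (pvIsEnd (List.replicate (m + 1) x ++ rest)) (List.range m) = [] := by
      rw [List.filter_eq_nil_iff]
      intro j hj
      simp only [List.mem_range] at hj
      simp only [pvIsEnd, decide_eq_true_eq]
      have h1 : ((j : Nat) : Int) + 1 = (((j + 1 : Nat)) : Int) := by push_cast; omega
      rw [PySem.List.pyGetD_natCast, h1, PySem.List.pyGetD_natCast,
          pvGetD_run x m rest j (by omega), pvGetD_run x m rest (j + 1) (by omega), hlen]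
      rintro ⟨h5, h | h⟩
      · push_cast at h; omega
      · exact h h5
    have hm : pvIsEnd (List.replicate (m + 1) x ++ rest) m = decide (x = 5) := by
      simp only [pvIsEnd]
      have h1 : ((m : Nat) : Int) + 1 = (((m + 1 + 0 : Nat)) : Int) := by push_cast; omega
      rw [PySem.List.pyGetD_natCast, pvGetD_run x m rest m (by omega), h1,
          PySem.List.pyGetD_natCast, pvGetD_shift, hlen, decide_eq_decide]
      cases rest with
      | nil =>
        constructor
        · exact fun h => h.1
        · intro h5
          refine ⟨h5, Or.inl ?_⟩
          push_cast [List.length_append, List.length_replicate, List.length_nil]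
          omega
      | cons y ys =>
        have hy : y ≠ x := hhead y ys rfl
        simp only [List.getD_cons_zero]
        constructor
        · exact fun h => h.1
        · intro h5
          exact ⟨h5, Or.inr fun hy5 => hy (hy5.trans h5.symm)⟩
    rw [hrest0, hm]
    by_cases hx : x = 5 <;> simp [hx]
  · -- shifted part: ends of L past the run are ends of rest, shifted by m+1
    rw [List.filter_map]
    congr 1
    apply List.filter_congr
    intro i hi
    simp only [List.mem_range] at hi
    simp only [Function.comp_apply, pvIsEnd]
    have h1 : ((m + 1 + i : Nat) : Int) + 1 = ((m + 1 + (i + 1) : Nat) : Int) := by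
      push_cast; omega
    have h2 : (((i : Nat)) : Int) + 1 = (((i + 1 : Nat)) : Int) := by push_cast; omega
    rw [PySem.List.pyGetD_natCast, h1, PySem.List.pyGetD_natCast, pvGetD_shift, pvGetD_shift,
        h2, PySem.List.pyGetD_natCast, PySem.List.pyGetD_natCast]
    have hlen2 : (List.replicate (m + 1) x ++ rest).length = (m + 1) + rest.length := by simp
    rw [hlen2, decide_eq_decide]
    constructor
    · rintro ⟨h5, h | h⟩
      · exact ⟨h5, Or.inl (by push_cast at h ⊢; omega)⟩
      · exact ⟨h5, Or.inr h⟩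
    · rintro ⟨h5, h | h⟩
      · exact ⟨h5, Or.inl (by push_cast at h ⊢; omega)⟩
      · exact ⟨h5, Or.inr h⟩

-- B's count over x :: xs: the head run contributes 1 exactly when it is a run of 5s
-- of length ≥ duration*2; the rest contributes its own count (indices shift, spans do not).
theorem pvB_run_step (d : Int) (x : Int) (xs : List Int) :
    getNWake_alt (x :: xs) d =
      (if x = 5 ∧ (((pvRunSplit x xs).1 + 1 : Nat) : Int) ≥ d * 2 then 1 else 0) +
        getNWake_alt (pvRunSplit x xs).2 d := by
  set m := (pvRunSplit x xs).1 with hm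
  set rest := (pvRunSplit x xs).2 with hr
  have hdec : x :: xs = List.replicate (m + 1) x ++ rest := pvRunSplit_decomp x xs
  have hhead : ∀ y ys, rest = y :: ys → y ≠ x := fun y ys h => pvRunSplit_head x xs y ys h
  simp only [getNWake_alt]
  rw [hdec, pvStarts_decomp x m rest hhead, pvEnds_decomp x m rest hhead]
  have hshift : ∀ S E : List Nat,
      ((S.map (m + 1 + ·)).zip (E.map (m + 1 + ·))).filter
          (fun p => decide (d * 2 ≤ (p.2 : Int) - (p.1 : Int) + 1)) =
        ((S.zip E).filter
          (fun p => decide (d * 2 ≤ (p.2 : Int) - (p.1 : Int) + 1))).map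
            (Prod.map (m + 1 + ·) (m + 1 + ·)) := by
    intro S E
    rw [List.zip_map, List.filter_map]
    congr 1
    apply List.filter_congr
    rintro ⟨s, e⟩ _
    simp only [Function.comp_apply, Prod.map_apply, decide_eq_decide]
    push_cast
    omega
  by_cases hx : x = 5
  · rw [if_pos hx, if_pos hx, List.singleton_append, List.singleton_append,
        List.zip_cons_cons, List.filter_cons]
    by_cases hge : (((m + 1 : Nat)) : Int) ≥ d * 2
    · have hc : d * 2 ≤ ((m : Nat) : Int) + 1 := by push_cast at hge; omega
      simp [hshift, hc, hx]
      omega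
    · have hc : ¬ (d * 2 ≤ ((m : Nat) : Int) + 1) := by push_cast at hge; omega
      simp [hshift, hc, hx]
  · rw [if_neg hx, if_neg hx, List.nil_append, List.nil_append]
    simp [hshift, hx]

theorem pvB_eq_pvH (L : List Int) (d : Int) : getNWake_alt L d = pvH d L 0 0 := by
  induction hn : L.length using Nat.strong_induction_on generalizing L with
  | _ n ih =>
    cases L with
    | nil => simp [getNWake_alt, pvH]
    | cons x xs =>
      have hrec : getNWake_alt (pvRunSplit x xs).2 d = pvH d (pvRunSplit x xs).2 0 0 := by
        apply ih (pvRunSplit x xs).2.length _ _ rfl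
        have := pvRunSplit_len x xs
        simp at hn; omega
      rw [pvB_run_step, hrec]
      by_cases hx : x = 5
      · subst hx
        rw [pvH_run5]
        conv_rhs => rw [pvH_add]
        have hcast : (0:Int) + 1 + ((pvRunSplit 5 xs).1 : Int)
            = (((pvRunSplit 5 xs).1 + 1 : Nat) : Int) := by push_cast; ring
        rw [hcast]
        split_ifs with h1 h2 h3 <;> simp_all <;> omega
      · rw [pvH_runNon5 d x hx]
        simp [hx]

-- ===== VERDICT (by name: the statement is the Claim_ definition above) =====
theorem getNWake_spec : Claim_equal_getNWake := by
  intro L duration _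
  unfold Spec_getNWake getNWake
  rw [pvB_eq_pvH]
  have h := pvA_eq_pvH duration L [] 0 0 0
  simpa using h
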